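-- pv_equiv track=rewrite | github.com/wadelamble/MasterMindNew | Mastermind.py | c_grade
-- ===== SOURCE A (Python) =====
-- def c_grade(black_pegs, white_pegs, guess, code):
--     # grading the guess
--     black_pegs = 0
--     white_pegs = 0
--     guess_2 = []
--     code_2 = []
--     for i in range(4):
--         if code[i] == guess[i]:
--             black_pegs = black_pegs + 1
--         else:
--             guess_2.append(guess[i])
--             code_2.append(code[i])
--
--     while len(guess_2) != 0:
--         if guess_2[0] in code_2:
--             white_pegs = white_pegs + 1
--             code_2.remove(guess_2[0])
--         guess_2.pop(0)
--     return black_pegs, white_pegs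
-- ===== SOURCE B (Python) =====
-- def c_grade(black_pegs, white_pegs, guess, code):
--     # grading the guess: exact-position pass, then aggregate min-of-counts for whites
--     black_pegs = sum(1 for i in range(4) if code[i] == guess[i])
--     guess_2 = [guess[i] for i in range(4) if code[i] != guess[i]]
--     code_2 = [code[i] for i in range(4) if code[i] != guess[i]]
--     white_pegs = sum(min(guess_2.count(c), code_2.count(c)) for c in set(guess_2))
--     return black_pegs, white_pegs
-- ===== Notes on version B (the rewrite author's own statement) =====
-- stated objective: idiomatic
-- what changed: The sequential membership-test-and-remove while-loop over a consumable copy of the leftover code colors is replaced by an aggregate sum of min(count in leftover guess, count in leftover code) over the distinct leftover guess colors, and the position pass becomes comprehensions.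
import Mathlib
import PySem

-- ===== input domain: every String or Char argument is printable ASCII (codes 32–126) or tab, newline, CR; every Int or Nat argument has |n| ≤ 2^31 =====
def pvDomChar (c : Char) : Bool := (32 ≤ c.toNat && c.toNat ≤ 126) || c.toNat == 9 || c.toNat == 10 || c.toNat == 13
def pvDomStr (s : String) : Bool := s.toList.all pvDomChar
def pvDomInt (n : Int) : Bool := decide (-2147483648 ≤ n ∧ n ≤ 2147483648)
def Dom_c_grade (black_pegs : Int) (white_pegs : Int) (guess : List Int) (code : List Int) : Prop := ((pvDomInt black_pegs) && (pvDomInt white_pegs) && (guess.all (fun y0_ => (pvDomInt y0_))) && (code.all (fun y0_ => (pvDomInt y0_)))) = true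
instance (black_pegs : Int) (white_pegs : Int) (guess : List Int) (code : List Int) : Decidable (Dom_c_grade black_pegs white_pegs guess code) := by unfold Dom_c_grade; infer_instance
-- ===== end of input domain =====

-- B replaces A's membership-test-and-remove while-loop by an aggregate min-of-counts sum
-- over the distinct leftover guess colors (idiomatic; return value only — A's parameters
-- black_pegs/white_pegs are reassigned locally in both versions, no observable mutation).

-- ===== PORT A =====
-- the while-loop: pops guess_2's head; if it occurs in code_2, count a white and remove it
def c_gradeWhile : List Int → List Int → Int → Int
  | [], _, w => w
  | g :: gs, cs, w =>
    if g ∈ cs then c_gradeWhile gs ((PySem.List.remove? cs g).getD cs) (w + 1)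
    else c_gradeWhile gs cs w

def c_grade (black_pegs : Int) (white_pegs : Int) (guess : List Int) (code : List Int) : Int × Int :=
  let s := (PySem.List.pyRange 0 4 1).foldl
    (fun (st : Int × List Int × List Int) i =>
      if PySem.List.pyGetD code i 0 == PySem.List.pyGetD guess i 0 then
        (st.1 + 1, st.2.1, st.2.2)
      else
        (st.1, st.2.1 ++ [PySem.List.pyGetD guess i 0], st.2.2 ++ [PySem.List.pyGetD code i 0]))
    (0, [], [])
  (s.1, c_gradeWhile s.2.1 s.2.2 0)

-- ===== PORT B =====
-- sum(min(guess_2.count(c), code_2.count(c)) for c in set(guess_2))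
def c_gradeAltWhite (g2 c2 : List Int) : Int :=
  (PySem.Set.ofList g2).foldl
    (fun a c => a + ((min (PySem.List.count g2 c) (PySem.List.count c2 c) : Nat) : Int)) 0

def c_grade_alt (black_pegs : Int) (white_pegs : Int) (guess : List Int) (code : List Int) : Int × Int :=
  let black := (((PySem.List.pyRange 0 4 1).filter
      (fun i => PySem.List.pyGetD code i 0 == PySem.List.pyGetD guess i 0)).map
      (fun _ => (1 : Int))).sum
  let g2 := ((PySem.List.pyRange 0 4 1).filter
      (fun i => !(PySem.List.pyGetD code i 0 == PySem.List.pyGetD guess i 0))).map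
      (fun i => PySem.List.pyGetD guess i 0)
  let c2 := ((PySem.List.pyRange 0 4 1).filter
      (fun i => !(PySem.List.pyGetD code i 0 == PySem.List.pyGetD guess i 0))).map
      (fun i => PySem.List.pyGetD code i 0)
  (black, c_gradeAltWhite g2 c2)

-- ===== PRECONDITION & SPEC =====
-- Python A indexes guess[i]/code[i] for i in range(4): IndexError when either list is shorter than 4.
def Pre_c_grade (black_pegs : Int) (white_pegs : Int) (guess : List Int) (code : List Int) : Prop :=
  4 ≤ guess.length ∧ 4 ≤ code.length
instance (black_pegs : Int) (white_pegs : Int) (guess : List Int) (code : List Int) : Decidable (Pre_c_grade black_pegs white_pegs guess code) := by unfold Pre_c_grade; infer_instance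

def pvWitness_c_grade : Int × Int × List Int × List Int := (0, 0, [1, 2, 3, 4], [4, 3, 2, 1])

def Spec_c_grade (black_pegs : Int) (white_pegs : Int) (guess : List Int) (code : List Int) (out : Int × Int) : Prop := out = c_grade_alt black_pegs white_pegs guess code
instance (black_pegs : Int) (white_pegs : Int) (guess : List Int) (code : List Int) (out : Int × Int) : Decidable (Spec_c_grade black_pegs white_pegs guess code out) := by unfold Spec_c_grade; infer_instance

-- ===== CLAIM =====
def Claim_equal_c_grade : Prop := ∀ (black_pegs : Int) (white_pegs : Int) (guess : List Int) (code : List Int), Dom_c_grade black_pegs white_pegs guess code → Pre_c_grade black_pegs white_pegs guess code → Spec_c_grade black_pegs white_pegs guess code (c_grade black_pegs white_pegs guess code)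

-- ===== LEMMAS AND PROOFS =====
-- A's while-loop counts the cardinality of the multiset intersection of leftovers.
lemma c_gradeWhile_card (gs : List Int) : ∀ (cs : List Int) (w : Int),
    c_gradeWhile gs cs w = w + ((Multiset.card ((↑gs : Multiset Int) ∩ ↑cs)) : Int) := by
  induction gs with
  | nil => intro cs w; simp [c_gradeWhile]
  | cons g gs ih =>
    intro cs w
    by_cases h : g ∈ cs
    · rw [show c_gradeWhile (g :: gs) cs w
          = c_gradeWhile gs ((PySem.List.remove? cs g).getD cs) (w + 1) from by
            simp [c_gradeWhile, h]]
      rw [PySem.List.remove?_eq_some_erase cs g h, Option.getD_some, ih]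
      have hc : (↑(g :: gs) : Multiset Int) ∩ ↑cs
          = g ::ₘ ((↑gs : Multiset Int) ∩ (↑cs : Multiset Int).erase g) := by
        rw [← Multiset.cons_coe]
        exact Multiset.cons_inter_of_pos _ (by simpa using h)
      rw [show ((cs.erase g : List Int) : Multiset Int) = (↑cs : Multiset Int).erase g from by
            simp, hc, Multiset.card_cons]
      push_cast; ring
    · rw [show c_gradeWhile (g :: gs) cs w = c_gradeWhile gs cs w from by
            simp [c_gradeWhile, h]]
      rw [ih]
      have hc : (↑(g :: gs) : Multiset Int) ∩ ↑cs = (↑gs : Multiset Int) ∩ ↑cs := by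
        rw [← Multiset.cons_coe]
        exact Multiset.cons_inter_of_neg _ (by simpa using h)
      rw [hc]

-- B's min-of-counts sum is the same cardinality.
lemma c_gradeAltWhite_card (g2 c2 : List Int) :
    c_gradeAltWhite g2 c2 = ((Multiset.card ((↑g2 : Multiset Int) ∩ ↑c2)) : Int) := by
  unfold c_gradeAltWhite
  rw [PySem.List.foldl_add, zero_add]
  have hnd := PySem.Set.nodup_ofList g2
  have hsum : ((PySem.Set.ofList g2).map
      (fun c => ((min (PySem.List.count g2 c) (PySem.List.count c2 c) : Nat) : Int))).sum
      = ∑ x ∈ (PySem.Set.ofList g2).toFinset,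
          ((min (PySem.List.count g2 x) (PySem.List.count c2 x) : Nat) : Int) := by
    rw [List.sum_toFinset _ hnd]
  rw [hsum]
  have hfs : (PySem.Set.ofList g2).toFinset = g2.toFinset := by
    ext x; simp [PySem.Set.mem_ofList]
  rw [hfs]
  have hcount : ∀ x : Int, (min (PySem.List.count g2 x) (PySem.List.count c2 x) : Nat)
      = Multiset.count x ((↑g2 : Multiset Int) ∩ ↑c2) := by
    intro x
    rw [Multiset.count_inter]
    simp [PySem.List.count_eq]
  have : ∑ x ∈ g2.toFinset,
      ((min (PySem.List.count g2 x) (PySem.List.count c2 x) : Nat) : Int)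
      = ((∑ x ∈ g2.toFinset, Multiset.count x ((↑g2 : Multiset Int) ∩ ↑c2) : Nat) : Int) := by
    push_cast
    exact Finset.sum_congr rfl (fun x _ => by exact_mod_cast congrArg Nat.cast (hcount x))
  rw [this]
  congr 1
  have hsub : ((↑g2 : Multiset Int) ∩ ↑c2).toFinset ⊆ g2.toFinset := by
    intro x hx
    simp only [Multiset.mem_toFinset] at hx
    have := Multiset.mem_of_le Multiset.inter_le_left hx
    simpa using this
  rw [← Multiset.toFinset_sum_count_eq ((↑g2 : Multiset Int) ∩ ↑c2)]
  refine (Finset.sum_subset hsub ?_).symm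
  intro x _ hx
  simp only [Multiset.mem_toFinset] at hx
  exact Multiset.count_eq_zero.mpr hx

lemma white_eq (g2 c2 : List Int) : c_gradeWhile g2 c2 0 = c_gradeAltWhite g2 c2 := by
  rw [c_gradeWhile_card, c_gradeAltWhite_card, zero_add]

-- ===== VERDICT =====
theorem c_grade_spec : Claim_equal_c_grade := by
  intro black_pegs white_pegs guess code _ _
  unfold Spec_c_grade c_grade c_grade_alt
  rw [show PySem.List.pyRange 0 4 1 = [0, 1, 2, 3] from by decide]
  simp only [List.foldl_cons, List.foldl_nil, List.filter_cons, List.filter_nil]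
  by_cases h0 : (PySem.List.pyGetD code 0 0 == PySem.List.pyGetD guess 0 0) = true <;>
  by_cases h1 : (PySem.List.pyGetD code 1 0 == PySem.List.pyGetD guess 1 0) = true <;>
  by_cases h2 : (PySem.List.pyGetD code 2 0 == PySem.List.pyGetD guess 2 0) = true <;>
  by_cases h3 : (PySem.List.pyGetD code 3 0 == PySem.List.pyGetD guess 3 0) = true <;>
  simp [h0, h1, h2, h3, white_eq]
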